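-- pv_equiv track=rewrite | github.com/jbowensii/lotr-rtm-items-to-wiki | generate_consumables_wiki.py | get_material_display_name
-- ===== SOURCE A (Python) =====
-- MATERIAL_KEY_MAP = {
--     "Item.Scrap": "Metal Fragments",
-- }
--
-- def find_string_by_suffix(string_map, suffix):
--     """
--     Find a string value by matching the suffix of the key.
--     This helps handle variations in key naming conventions.
--     """
--     for key, value in string_map.items():
--         if key.endswith(suffix):
--             return value
--     return None
--
-- def get_material_display_name(material_key, string_map):
--     """Get display name for a crafting material."""
--     # Check special material mappings first
--     if material_key in MATERIAL_KEY_MAP: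
--         return MATERIAL_KEY_MAP[material_key]
--
--     # Try multiple lookup patterns
--     lookup_patterns = [
--         f"Items.Items.{material_key}.Name",
--         f"Items.Ores.{material_key}.Name",
--         f"Consumable.{material_key}.Name",
--         f"Category.Item.{material_key}",
--         f"Item.{material_key}.Name",
--         material_key,
--     ]
--
--     for pattern in lookup_patterns:
--         display_name = string_map.get(pattern)
--         if display_name:
--             return display_name
--
--     # Try suffix matching
--     for pattern in lookup_patterns:
--         parts = pattern.split('.')
--         if len(parts) >= 2:
--             suffix = '.'.join(parts[-2:])
--             display_name = find_string_by_suffix(string_map, suffix)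
--             if display_name:
--                 return display_name
--
--     # Fallback to the key itself
--     return material_key
-- ===== SOURCE B (Python) =====
-- MATERIAL_KEY_MAP = {
--     "Item.Scrap": "Metal Fragments",
-- }
--
-- def get_material_display_name(material_key, string_map):
--     """Get display name for a crafting material (indexed suffix phase)."""
--     if material_key in MATERIAL_KEY_MAP:
--         return MATERIAL_KEY_MAP[material_key]
--
--     lookup_patterns = [
--         f"Items.Items.{material_key}.Name",
--         f"Items.Ores.{material_key}.Name",
--         f"Consumable.{material_key}.Name",
--         f"Category.Item.{material_key}",
--         f"Item.{material_key}.Name",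
--         material_key,
--     ]
--
--     for pattern in lookup_patterns:
--         display_name = string_map.get(pattern)
--         if display_name:
--             return display_name
--
--     # Suffix phase: one pass over string_map builds an index from each wanted
--     # two-part suffix to the value of the FIRST key ending with it (stored even
--     # when falsy, never overwritten), replacing a rescan per pattern.
--     suffixes = []
--     for pattern in lookup_patterns:
--         parts = pattern.split('.')
--         if len(parts) >= 2:
--             suffixes.append('.'.join(parts[-2:]))
--
--     first_match = {}
--     for key, value in string_map.items():
--         for s in suffixes:
--             if s not in first_match and key.endswith(s):
--                 first_match[s] = value
--
--     for s in suffixes: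
--         if s in first_match and first_match[s]:
--             return first_match[s]
--
--     return material_key
-- ===== Notes on version B (the rewrite author's own statement) =====
-- stated objective: alternative
-- what changed: The suffix phase's per-pattern rescans of string_map (via find_string_by_suffix) are replaced by a single pass over string_map.items() that builds a first-key-wins index from each wanted two-part suffix to the first matching key's value (stored even when falsy), which is then consulted per pattern in priority order.
import Mathlib
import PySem

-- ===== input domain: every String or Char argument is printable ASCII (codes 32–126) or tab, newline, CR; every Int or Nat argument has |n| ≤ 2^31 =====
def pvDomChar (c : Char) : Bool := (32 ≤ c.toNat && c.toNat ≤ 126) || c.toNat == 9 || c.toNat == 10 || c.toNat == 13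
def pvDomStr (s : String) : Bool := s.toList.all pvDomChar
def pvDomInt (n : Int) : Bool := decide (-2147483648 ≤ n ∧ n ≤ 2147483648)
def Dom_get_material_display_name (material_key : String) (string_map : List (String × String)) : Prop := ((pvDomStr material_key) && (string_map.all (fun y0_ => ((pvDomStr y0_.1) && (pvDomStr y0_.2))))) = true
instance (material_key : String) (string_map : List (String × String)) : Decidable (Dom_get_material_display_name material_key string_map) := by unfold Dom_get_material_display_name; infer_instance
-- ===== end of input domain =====

-- B replaces the suffix phase's per-pattern rescans of string_map by ONE pass building a
-- first-key-wins suffix index that is then consulted per pattern (objective: alternative;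
-- same asymptotic cost, different traversal of the data).

def MATERIAL_KEY_MAP : PySem.Dict String String :=
  PySem.Dict.ofList [("Item.Scrap", "Metal Fragments")]

-- ===== PORT A =====
-- for key, value in string_map.items(): if key.endswith(suffix): return value
def pyFindStringBySuffix (string_map : List (String × String)) (suffix : String) : Option String :=
  match string_map with
  | [] => none
  | (key, value) :: rest =>
    if PySem.Str.endswith key suffix then some value else pyFindStringBySuffix rest suffix

-- for pattern in lookup_patterns: display_name = string_map.get(pattern); if display_name: return …
def pyDirectPhase (d : PySem.Dict String String) (patterns : List String) : Option String :=
  match patterns with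
  | [] => none
  | p :: ps =>
    match d.get? p with
    | some v => if v = "" then pyDirectPhase d ps else some v
    | none => pyDirectPhase d ps

-- for pattern in lookup_patterns: parts = pattern.split('.'); if len(parts) >= 2: …
def pySuffixPhase (string_map : List (String × String)) (patterns : List String) : Option String :=
  match patterns with
  | [] => none
  | p :: ps =>
    let parts := (PySem.Str.split? p ".").getD []   -- '.' ≠ "" so split? is always some
    if 2 ≤ parts.length then
      let suffix := PySem.Str.join "." (PySem.List.slice parts (some (-2)) none)
      match pyFindStringBySuffix string_map suffix with
      | some v => if v = "" then pySuffixPhase string_map ps else some v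
      | none => pySuffixPhase string_map ps
    else pySuffixPhase string_map ps

def get_material_display_name (material_key : String) (string_map : List (String × String)) : String :=
  match MATERIAL_KEY_MAP.get? material_key with
  | some v => v
  | none =>
    let lookup_patterns : List String :=
      [ "Items.Items." ++ material_key ++ ".Name",
        "Items.Ores." ++ material_key ++ ".Name",
        "Consumable." ++ material_key ++ ".Name",
        "Category.Item." ++ material_key,
        "Item." ++ material_key ++ ".Name",
        material_key ]
    match pyDirectPhase (PySem.Dict.mk string_map) lookup_patterns with
    | some v => v
    | none =>
      match pySuffixPhase string_map lookup_patterns with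
      | some v => v
      | none => material_key

-- ===== PORT B =====
-- same direct-lookup loop as A's python (B keeps that phase unchanged)
def altDirectPhase (d : PySem.Dict String String) (patterns : List String) : Option String :=
  match patterns with
  | [] => none
  | p :: ps =>
    match d.get? p with
    | some v => if v = "" then altDirectPhase d ps else some v
    | none => altDirectPhase d ps

-- suffixes = []; for pattern in …: parts = pattern.split('.'); if len(parts) >= 2: suffixes.append(…)
def altSuffixList (patterns : List String) : List String :=
  patterns.foldl
    (fun acc pattern =>
      let parts := (PySem.Str.split? pattern ".").getD []
      if 2 ≤ parts.length then
        acc ++ [PySem.Str.join "." (PySem.List.slice parts (some (-2)) none)]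
      else acc)
    []

-- first_match = {}; for key, value in string_map.items(): for s in suffixes:
--   if s not in first_match and key.endswith(s): first_match[s] = value
def altBuildIndex (string_map : List (String × String)) (suffixes : List String) :
    PySem.Dict String String :=
  string_map.foldl
    (fun first kv =>
      suffixes.foldl
        (fun first s =>
          if !first.contains s && PySem.Str.endswith kv.1 s then first.insert s kv.2 else first)
        first)
    PySem.Dict.empty

-- for s in suffixes: if s in first_match and first_match[s]: return first_match[s]
def altSuffixScan (first : PySem.Dict String String) (suffixes : List String) : Option String :=
  match suffixes with
  | [] => none
  | s :: rest =>
    match first.get? s with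
    | some v => if v = "" then altSuffixScan first rest else some v
    | none => altSuffixScan first rest

def get_material_display_name_alt (material_key : String) (string_map : List (String × String)) : String :=
  match MATERIAL_KEY_MAP.get? material_key with
  | some v => v
  | none =>
    let lookup_patterns : List String :=
      [ "Items.Items." ++ material_key ++ ".Name",
        "Items.Ores." ++ material_key ++ ".Name",
        "Consumable." ++ material_key ++ ".Name",
        "Category.Item." ++ material_key,
        "Item." ++ material_key ++ ".Name",
        material_key ]
    match altDirectPhase (PySem.Dict.mk string_map) lookup_patterns with
    | some v => v
    | none =>
      let suffixes := altSuffixList lookup_patterns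
      match altSuffixScan (altBuildIndex string_map suffixes) suffixes with
      | some v => v
      | none => material_key

-- ===== PRECONDITION & SPEC =====
def Spec_get_material_display_name (material_key : String) (string_map : List (String × String)) (out : String) : Prop := out = get_material_display_name_alt material_key string_map
instance (material_key : String) (string_map : List (String × String)) (out : String) : Decidable (Spec_get_material_display_name material_key string_map out) := by unfold Spec_get_material_display_name; infer_instance

-- ===== CLAIM (what is proved, stated in full; the proofs are below) =====
def Claim_equal_get_material_display_name : Prop := ∀ (material_key : String) (string_map : List (String × String)), Dom_get_material_display_name material_key string_map → Spec_get_material_display_name material_key string_map (get_material_display_name material_key string_map)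

-- ===== LEMMAS AND PROOFS =====

-- the suffix a pattern contributes to B's suffix list (proof-side view of one loop step)
def sfxOf (pattern : String) : Option String :=
  let parts := (PySem.Str.split? pattern ".").getD []
  if 2 ≤ parts.length then
    some (PySem.Str.join "." (PySem.List.slice parts (some (-2)) none))
  else none

lemma altSuffixList_go (patterns : List String) (acc : List String) :
    patterns.foldl
      (fun acc pattern =>
        let parts := (PySem.Str.split? pattern ".").getD []
        if 2 ≤ parts.length then
          acc ++ [PySem.Str.join "." (PySem.List.slice parts (some (-2)) none)]
        else acc)
      acc = acc ++ patterns.filterMap sfxOf := by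
  induction patterns generalizing acc with
  | nil => simp
  | cons p ps ih =>
    simp only [List.foldl_cons, List.filterMap_cons, sfxOf]
    by_cases h : 2 ≤ ((PySem.Str.split? p ".").getD []).length
    · simp [h, ih]
      rfl
    · simp [h, ih]
      rfl

lemma altSuffixList_eq (patterns : List String) :
    altSuffixList patterns = patterns.filterMap sfxOf := by
  simpa using altSuffixList_go patterns []

-- one key processed against all suffixes: get? afterwards, for any s
lemma inner_get (key value : String) (sfxs : List String) (first : PySem.Dict String String)
    (s : String) :
    (sfxs.foldl
      (fun first s' =>
        if !first.contains s' && PySem.Str.endswith key s' then first.insert s' value else first)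
      first).get? s
    = (first.get? s).or
        (if s ∈ sfxs ∧ PySem.Str.endswith key s = true then some value else none) := by
  induction sfxs generalizing first with
  | nil => simp
  | cons s' rest ih =>
    simp only [List.foldl_cons, ih]
    by_cases hs : s = s'
    · subst hs
      cases hget : first.get? s with
      | some w =>
        have hc : first.contains s = true := by
          rw [PySem.Dict.contains_eq_isSome_get?, hget]; rfl
        simp [hc, hget]
      | none =>
        have hc : first.contains s = false := by
          rw [PySem.Dict.contains_eq_isSome_get?, hget]; rfl
        by_cases he : PySem.Chars.endswith key.toList s.toList = true
        · simp [hc, he, hget]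
        · simp [hc, he, hget]
    · by_cases hb : (!first.contains s' && PySem.Str.endswith key s') = true
      · rw [if_pos hb, PySem.Dict.get?_insert_of_ne first value hs]
        simp [hs]
        rfl
      · rw [if_neg hb]
        simp [hs]
        rfl

-- the whole index pass: for s among the wanted suffixes, the index records
-- exactly what A's rescan finds
lemma index_get (string_map : List (String × String)) (sfxs : List String)
    (first : PySem.Dict String String) (s : String) (hmem : s ∈ sfxs) :
    (string_map.foldl
      (fun first kv =>
        sfxs.foldl
          (fun first s' =>
            if !first.contains s' && PySem.Str.endswith kv.1 s' then first.insert s' kv.2 else first)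
          first)
      first).get? s
    = (first.get? s).or (pyFindStringBySuffix string_map s) := by
  induction string_map generalizing first with
  | nil => simp [pyFindStringBySuffix]
  | cons kv rest ih =>
    simp only [List.foldl_cons, ih, inner_get kv.1 kv.2 sfxs first s]
    cases kv with
    | mk key value =>
      simp only [pyFindStringBySuffix]
      by_cases he : PySem.Chars.endswith key.toList s.toList = true
      · simp [hmem, he, Option.or_assoc]
      · simp [hmem, he, Option.or_assoc]

lemma altBuildIndex_get (string_map : List (String × String)) (sfxs : List String)
    (s : String) (hmem : s ∈ sfxs) :
    (altBuildIndex string_map sfxs).get? s = pyFindStringBySuffix string_map s := by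
  unfold altBuildIndex
  simpa using index_get string_map sfxs PySem.Dict.empty s hmem

-- B's scan over the collected suffixes equals A's suffix phase, given the index is faithful
lemma scan_eq_suffixPhase (string_map : List (String × String)) (patterns : List String)
    (idx : PySem.Dict String String)
    (h : ∀ s ∈ patterns.filterMap sfxOf, idx.get? s = pyFindStringBySuffix string_map s) :
    altSuffixScan idx (patterns.filterMap sfxOf) = pySuffixPhase string_map patterns := by
  induction patterns with
  | nil => simp [altSuffixScan, pySuffixPhase]
  | cons p ps ih =>
    simp only [List.filterMap_cons]
    cases hsf : sfxOf p with
    | none =>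
      have h2 : ¬ 2 ≤ ((PySem.Str.split? p ".").getD []).length := by
        intro hle; simp [sfxOf, hle] at hsf
      simp only [pySuffixPhase]
      rw [if_neg h2]
      exact ih (fun s hs => h s (by simp [hsf, hs]))
    | some sfx =>
      have h2 : 2 ≤ ((PySem.Str.split? p ".").getD []).length := by
        by_contra hle; simp [sfxOf, hle] at hsf
      have hsfx : sfx = PySem.Str.join "."
          (PySem.List.slice ((PySem.Str.split? p ".").getD []) (some (-2)) none) := by
        simp [sfxOf, h2] at hsf; exact hsf.symm
      have hrest : ∀ s ∈ ps.filterMap sfxOf, idx.get? s = pyFindStringBySuffix string_map s :=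
        fun s hs => h s (by simp [hsf, hs])
      have hhead : idx.get? sfx = pyFindStringBySuffix string_map sfx :=
        h sfx (by simp [hsf])
      simp only [pySuffixPhase, altSuffixScan]
      rw [if_pos h2, ← hsfx, hhead]
      cases pyFindStringBySuffix string_map sfx with
      | none => exact ih hrest
      | some v =>
        by_cases hv : v = ""
        · simp [hv, ih hrest]
        · simp [hv]

lemma directPhase_eq (d : PySem.Dict String String) (patterns : List String) :
    altDirectPhase d patterns = pyDirectPhase d patterns := by
  induction patterns with
  | nil => rfl
  | cons p ps ih =>
    simp only [altDirectPhase, pyDirectPhase, ih]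

-- ===== VERDICT (by name: the statement is the Claim_ definition above) =====
theorem get_material_display_name_spec : Claim_equal_get_material_display_name := by
  intro material_key string_map _
  unfold Spec_get_material_display_name
  unfold get_material_display_name get_material_display_name_alt
  cases MATERIAL_KEY_MAP.get? material_key with
  | some v => rfl
  | none =>
    simp only []
    generalize hp : [ "Items.Items." ++ material_key ++ ".Name",
        "Items.Ores." ++ material_key ++ ".Name",
        "Consumable." ++ material_key ++ ".Name",
        "Category.Item." ++ material_key,
        "Item." ++ material_key ++ ".Name",
        material_key ] = patterns
    rw [directPhase_eq]
    cases pyDirectPhase (PySem.Dict.mk string_map) patterns with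
    | some v => rfl
    | none =>
      have hidx : ∀ s ∈ patterns.filterMap sfxOf,
          (altBuildIndex string_map (altSuffixList patterns)).get? s
            = pyFindStringBySuffix string_map s := by
        intro s hs
        exact altBuildIndex_get string_map (altSuffixList patterns) s
          (by rw [altSuffixList_eq]; exact hs)
      have := scan_eq_suffixPhase string_map patterns
        (altBuildIndex string_map (altSuffixList patterns)) hidx
      rw [altSuffixList_eq patterns] at this
      rw [altSuffixList_eq patterns, this]
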